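-- pv_equiv track=rewrite | github.com/monkey23320/CodingTest | 프로그래머스/문자열 다루기 기본.py | solution
-- ===== SOURCE A (Python) =====
-- def solution(s):
--     if len(s) == 4 or len(s) == 6:
--         for a in s:
--             if '0' <= a <= '9':
--                 continue
--             else:
--                 return False
--         return True
--     return False
-- ===== SOURCE B (Python) =====
-- import re
--
-- _PAT = re.compile(r'[0-9]{4}|[0-9]{6}')
--
--
-- def solution(s):
--     return bool(_PAT.fullmatch(s))
-- ===== Notes on version B (the rewrite author's own statement) =====
-- stated objective: idiomatic
-- what changed: Replaced the explicit length test plus character-scan loop with a single precompiled regex full-match [0-9]{4}|[0-9]{6}, whose alternation enforces both the digit class and the exact length at once.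
import Mathlib
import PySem

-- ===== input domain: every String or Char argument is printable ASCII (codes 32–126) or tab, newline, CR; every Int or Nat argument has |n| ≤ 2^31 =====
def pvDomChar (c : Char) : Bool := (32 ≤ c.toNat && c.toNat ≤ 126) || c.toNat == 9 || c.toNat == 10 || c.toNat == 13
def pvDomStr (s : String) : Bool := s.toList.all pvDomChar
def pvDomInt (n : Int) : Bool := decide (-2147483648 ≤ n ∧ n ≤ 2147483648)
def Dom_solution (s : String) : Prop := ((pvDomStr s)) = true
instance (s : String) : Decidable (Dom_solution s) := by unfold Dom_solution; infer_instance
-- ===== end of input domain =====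

-- B replaces A's length test + character loop with one regex full-match ([0-9]{4}|[0-9]{6}); idiomatic, not faster.

-- ===== PORT A =====
-- the for-loop over s: returns False on the first non-digit, True after the whole scan
def pvLoopA : List Char → Bool
  | [] => true
  | a :: rest => if '0' ≤ a ∧ a ≤ '9' then pvLoopA rest else false

def solution (s : String) : Bool :=
  if PySem.Str.len s = 4 ∨ PySem.Str.len s = 6 then pvLoopA s.toList else false

-- ===== PORT B =====
-- Hand-written exact port of re.fullmatch(r'[0-9]{4}|[0-9]{6}', s): PySem has no regex, so the
-- pattern's minimal DFA is simulated step for step — state `some k` = k digits matched so far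
-- (dead past 6), `none` = dead; accepting states are exactly 4 and 6. Exact for this pattern,
-- since [0-9] is the ASCII class '0'..'9' and fullmatch anchors both ends.
def pvDfaStep (st : Option Nat) (c : Char) : Option Nat :=
  match st with
  | none => none
  | some k => if '0' ≤ c ∧ c ≤ '9' ∧ k < 6 then some (k + 1) else none

def solution_alt (s : String) : Bool :=
  match s.toList.foldl pvDfaStep (some 0) with
  | some k => k = 4 || k = 6
  | none => false

-- ===== PRECONDITION & SPEC =====
def Spec_solution (s : String) (out : Bool) : Prop := out = solution_alt s
instance (s : String) (out : Bool) : Decidable (Spec_solution s out) := by unfold Spec_solution; infer_instance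

-- ===== CLAIM (what is proved, stated in full; the proofs are below) =====
def Claim_equal_solution : Prop := ∀ (s : String), Dom_solution s → Spec_solution s (solution s)

-- ===== LEMMAS AND PROOFS =====

theorem pvLoopA_eq_all (l : List Char) :
    pvLoopA l = l.all (fun a => decide ('0' ≤ a ∧ a ≤ '9')) := by
  induction l with
  | nil => rfl
  | cons a rest ih =>
    simp only [pvLoopA, List.all_cons]
    by_cases h : '0' ≤ a ∧ a ≤ '9' <;> simp [h, ih]

theorem pvFoldl_none (m : List Char) : m.foldl pvDfaStep none = none := by
  induction m with
  | nil => rfl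
  | cons b t iht => simpa [pvDfaStep] using iht

theorem pvDfa_run (l : List Char) (k : Nat) (hk : k ≤ 6) :
    l.foldl pvDfaStep (some k) =
      if (∀ x ∈ l, '0' ≤ x ∧ x ≤ '9') ∧ k + l.length ≤ 6 then
        some (k + l.length) else none := by
  induction l generalizing k with
  | nil => simp [hk]
  | cons a rest ih =>
    simp only [List.foldl_cons, List.forall_mem_cons, List.length_cons]
    by_cases hd : '0' ≤ a ∧ a ≤ '9'
    · by_cases hlt : k < 6
      · rw [show pvDfaStep (some k) a = some (k + 1) by
            simp [pvDfaStep, hd.1, hd.2, hlt],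
          ih (k + 1) (by omega)]
        split_ifs with h1 h2 h2
        · exact congrArg some (by omega)
        · exact absurd ⟨⟨hd, h1.1⟩, by omega⟩ h2
        · exact absurd ⟨h2.1.2, by omega⟩ h1
        · rfl
      · rw [show pvDfaStep (some k) a = none by simp [pvDfaStep, hlt],
          pvFoldl_none, if_neg (by rintro ⟨-, hl⟩; omega)]
    · rw [show pvDfaStep (some k) a = none from by
          simp only [pvDfaStep]; exact if_neg (fun h => hd ⟨h.1, h.2.1⟩),
        pvFoldl_none, if_neg (by rintro ⟨⟨hhd, -⟩, -⟩; exact hd hhd)]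

-- ===== VERDICT (by name: the statement is the Claim_ definition above) =====
theorem solution_spec : Claim_equal_solution := by
  intro s _
  unfold Spec_solution solution solution_alt
  rw [pvDfa_run s.toList 0 (by omega), pvLoopA_eq_all]
  have hlen : PySem.Str.len s = (s.toList.length : Int) := by
    rw [PySem.Str.len_eq, String.length_toList]
  rw [hlen]
  by_cases hall : ∀ x ∈ s.toList, '0' ≤ x ∧ x ≤ '9'
  · have hA : (s.toList.all fun a => decide ('0' ≤ a ∧ a ≤ '9')) = true := by
      simpa using hall
    by_cases hL : (↑s.toList.length : Int) = 4 ∨ (↑s.toList.length : Int) = 6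
    · rw [if_pos hL, hA, if_pos ⟨hall, by omega⟩]
      have h46 : s.toList.length = 4 ∨ s.toList.length = 6 := by
        rcases hL with h | h
        · left; omega
        · right; omega
      rcases h46 with h | h <;> simp [h]
    · rw [if_neg hL]
      by_cases h6 : s.toList.length ≤ 6
      · rw [if_pos ⟨hall, by omega⟩]
        have hst : s.toList.length = s.length := String.length_toList
        simp only [Nat.zero_add, Bool.false_eq, Bool.or_eq_false_iff,
          decide_eq_false_iff_not]
        constructor <;> omega
      · rw [if_neg (by rintro ⟨-, hl⟩; omega)]
  · have hA : (s.toList.all fun a => decide ('0' ≤ a ∧ a ≤ '9')) = false := by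
      simpa using hall
    rw [hA,
      if_neg (show ¬ ((∀ x ∈ s.toList, '0' ≤ x ∧ x ≤ '9') ∧ 0 + s.toList.length ≤ 6) from
        by rintro ⟨h, -⟩; exact hall h)]
    split_ifs <;> rfl
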